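-- pv_equiv track=rewrite | github.com/mbrt/git-autometa | src/git_autometa/jira_markdown_converter.py | convert_tables
-- ===== SOURCE A (Python) =====
-- def convert_tables(text: str) -> str:
--     """Convert JIRA tables to Markdown tables"""
--     lines = text.split('\n')
--     converted_lines = []
--     in_table = False
--
--     for i, line in enumerate(lines):
--         # JIRA table rows start and end with ||
--         if line.strip().startswith('||') and line.strip().endswith('||'):
--             if not in_table:
--                 in_table = True
--                 # This is a header row
--                 cells = [cell.strip() for cell in line.strip('|').split('||')]
--                 converted_lines.append('| ' + ' | '.join(cells) + ' |')
--                 # Add separator row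
--                 converted_lines.append('| ' + ' | '.join(['---'] * len(cells)) + ' |')
--             else:
--                 # Regular table row
--                 cells = [cell.strip() for cell in line.strip('|').split('||')]
--                 converted_lines.append('| ' + ' | '.join(cells) + ' |')
--         elif line.strip().startswith('|') and line.strip().endswith('|') and in_table:
--             # Regular table row (alternative format)
--             cells = [cell.strip() for cell in line.strip('|').split('|')]
--             converted_lines.append('| ' + ' | '.join(cells) + ' |')
--         else:
--             if in_table:
--                 in_table = False
--             converted_lines.append(line)
--
--     return '\n'.join(converted_lines)
-- ===== SOURCE B (Python) =====
-- def convert_tables(text: str) -> str: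
--     """Convert JIRA tables to Markdown tables (block-consuming rewrite)."""
--     def cells(raw: str, sep: str):
--         return [c.strip() for c in raw.strip('|').split(sep)]
--
--     def render(cs):
--         return '| ' + ' | '.join(cs) + ' |'
--
--     def dbl(raw: str) -> bool:
--         s = raw.strip()
--         return s.startswith('||') and s.endswith('||')
--
--     def sgl(raw: str) -> bool:
--         s = raw.strip()
--         return s.startswith('|') and s.endswith('|')
--
--     lines = text.split('\n')
--     out = []
--     i = 0
--     n = len(lines)
--     while i < n:
--         line = lines[i]
--         if dbl(line):
--             # table block start: header row + '---' separator, then consume the body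
--             hdr = cells(line, '||')
--             out.append(render(hdr))
--             out.append(render(['---'] * len(hdr)))
--             i += 1
--             while i < n and (dbl(lines[i]) or sgl(lines[i])):
--                 out.append(render(cells(lines[i], '||' if dbl(lines[i]) else '|')))
--                 i += 1
--         else:
--             out.append(line)
--             i += 1
--     return '\n'.join(out)
-- ===== Notes on version B (the rewrite author's own statement) =====
-- stated objective: alternative
-- what changed: Replaced A's single pass threading an in_table boolean flag through every line by a block-structured two-level loop: an outer loop that, at each ||-header line, emits the header and '---' separator and hands off to an inner loop that consumes the whole contiguous run of table rows, copying all other lines verbatim.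
import Mathlib
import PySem

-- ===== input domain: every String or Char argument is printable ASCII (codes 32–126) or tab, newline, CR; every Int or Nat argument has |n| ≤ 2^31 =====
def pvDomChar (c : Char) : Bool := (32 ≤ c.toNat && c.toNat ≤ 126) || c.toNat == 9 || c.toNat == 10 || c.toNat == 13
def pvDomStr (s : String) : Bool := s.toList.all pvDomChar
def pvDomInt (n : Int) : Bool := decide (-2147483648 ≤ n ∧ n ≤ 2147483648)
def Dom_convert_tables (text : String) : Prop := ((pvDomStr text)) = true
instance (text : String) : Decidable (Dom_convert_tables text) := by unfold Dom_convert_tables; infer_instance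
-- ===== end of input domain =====

-- B replaces A's per-line state machine (in_table flag) by an index-free block consumer:
-- on a ||-header it emits header + '---' separator and an inner pass consumes the body rows.
-- Objective: alternative decomposition (same cost); return value only, no mutation involved.

-- shared line-level primitives (identical expressions in both Pythons)
-- line.strip() starts and ends with '||'
def pvDbl (l : String) : Bool :=
  PySem.Str.startswith (PySem.Str.strip l) "||" && PySem.Str.endswith (PySem.Str.strip l) "||"
-- line.strip() starts and ends with '|'
def pvSgl (l : String) : Bool :=
  PySem.Str.startswith (PySem.Str.strip l) "|" && PySem.Str.endswith (PySem.Str.strip l) "|"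
-- [cell.strip() for cell in line.strip('|').split(sep)]
def pvSplit (s sep : String) : List String :=
  (PySem.Str.split? s sep).getD []  -- sep is always a non-empty literal, so split? is `some`
def pvCells (l sep : String) : List String :=
  (pvSplit (PySem.Str.stripChars l "|") sep).map PySem.Str.strip
-- '| ' + ' | '.join(cells) + ' |'
def pvRow (cells : List String) : String :=
  "| " ++ PySem.Str.join " | " cells ++ " |"

-- ===== PORT A =====
-- the for-loop over lines, threading the in_table flag
def pvGoA : List String → Bool → List String
  | [], _ => []
  | l :: rest, inTable =>
    if pvDbl l then
      (if !inTable then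
        [pvRow (pvCells l "||"), pvRow (List.replicate (pvCells l "||").length "---")]
       else
        [pvRow (pvCells l "||")]) ++ pvGoA rest true
    else if pvSgl l && inTable then
      pvRow (pvCells l "|") :: pvGoA rest true
    else
      l :: pvGoA rest false

def convert_tables (text : String) : String :=
  PySem.Str.join "\n" (pvGoA (pvSplit text "\n") false)

-- ===== PORT B =====
-- inner while loop: consume consecutive table rows, return (rendered rows, remaining lines)
def pvConsume : List String → List String × List String
  | [] => ([], [])
  | l :: rest =>
    if pvDbl l then
      let p := pvConsume rest
      (pvRow (pvCells l "||") :: p.1, p.2)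
    else if pvSgl l then
      let p := pvConsume rest
      (pvRow (pvCells l "|") :: p.1, p.2)
    else
      ([], l :: rest)

theorem pvConsume_len (ls : List String) : (pvConsume ls).2.length ≤ ls.length := by
  induction ls with
  | nil => simp [pvConsume]
  | cons l rest ih =>
    simp only [pvConsume]
    split_ifs <;> simp <;> omega

-- outer loop: a header line starts a block (header + separator + consumed body), else copy
def pvGoB : List String → List String
  | [] => []
  | l :: rest =>
    if pvDbl l then
      let hdr := pvCells l "||"
      let p := pvConsume rest
      pvRow hdr :: pvRow (List.replicate hdr.length "---") :: (p.1 ++ pvGoB p.2)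
    else
      l :: pvGoB rest
termination_by ls => ls.length
decreasing_by
  · exact Nat.lt_succ_of_le (pvConsume_len rest)
  · simp

def convert_tables_alt (text : String) : String :=
  PySem.Str.join "\n" (pvGoB (pvSplit text "\n"))

-- ===== PRECONDITION & SPEC =====
def Spec_convert_tables (text : String) (out : String) : Prop := out = convert_tables_alt text
instance (text : String) (out : String) : Decidable (Spec_convert_tables text out) := by unfold Spec_convert_tables; infer_instance

-- ===== CLAIM (what is proved, stated in full; the proofs are below) =====
def Claim_equal_convert_tables : Prop := ∀ (text : String), Dom_convert_tables text → Spec_convert_tables text (convert_tables text)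

-- ===== LEMMAS AND PROOFS =====

-- the loop invariant: A with in_table=false is B's outer loop, and A with in_table=true
-- is exactly the rows pvConsume renders followed by B restarted on the remainder.
theorem pvGoA_eq_pvGoB (ls : List String) :
    pvGoA ls false = pvGoB ls ∧
    pvGoA ls true = (pvConsume ls).1 ++ pvGoB (pvConsume ls).2 := by
  induction ls with
  | nil => simp [pvGoA, pvGoB, pvConsume]
  | cons l rest ih =>
    obtain ⟨ihf, iht⟩ := ih
    by_cases hd : pvDbl l
    · have hB : pvGoB (l :: rest) =
          pvRow (pvCells l "||") :: pvRow (List.replicate (pvCells l "||").length "---") ::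
            ((pvConsume rest).1 ++ pvGoB (pvConsume rest).2) := by
        rw [pvGoB]; simp [hd]
      constructor
      · rw [hB]; simp [pvGoA, hd, iht]
      · simp [pvGoA, pvConsume, hd, iht]
    · have hB : pvGoB (l :: rest) = l :: pvGoB rest := by
        rw [pvGoB]; simp [hd]
      by_cases hs : pvSgl l
      · constructor
        · rw [hB]; simp [pvGoA, hd, hs, ihf]
        · simp [pvGoA, pvConsume, hd, hs, iht]
      · constructor
        · rw [hB]; simp [pvGoA, hd, hs, ihf]
        · simp [pvGoA, pvConsume, hd, hs, ihf, hB]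

-- ===== VERDICT (by name: the statement is the Claim_ definition above) =====
theorem convert_tables_spec : Claim_equal_convert_tables := by
  intro text _
  unfold Spec_convert_tables convert_tables convert_tables_alt
  rw [(pvGoA_eq_pvGoB _).1]
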